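-- pv_equiv track=rewrite | github.com/ssmiler/tfhe_fbs_map | fbs_mapper/merge_fbs_nodes.py | is_superset_with_pos
-- ===== SOURCE A (Python) =====
-- def is_superset_with_pos(a, b):
--     i,j = 0,0
--     pos = list()
--     while i < len(a) and j < len(b):
--         if a[i] == b[j]:
--             pos.append(i)
--             j += 1
--         i += 1
--     return (j == len(b)), pos
-- ===== SOURCE B (Python) =====
-- def is_superset_with_pos(a, b):
--     # Preprocess: hash index value -> sorted list of its occurrence positions in a.
--     occ = {}
--     for idx, x in enumerate(a):
--         occ.setdefault(x, []).append(idx)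
--     pos = []
--     i = 0
--     for x in b:
--         lst = occ.get(x)
--         if lst is None:
--             return False, pos
--         # binary search: first occurrence of x at position >= i
--         lo, hi = 0, len(lst)
--         while lo < hi:
--             mid = (lo + hi) // 2
--             if lst[mid] < i:
--                 lo = mid + 1
--             else:
--                 hi = mid
--         if lo == len(lst):
--             return False, pos
--         k = lst[lo]
--         pos.append(k)
--         i = k + 1
--     return True, pos
-- ===== Notes on version B (the rewrite author's own statement) =====
-- stated objective: alternative
-- what changed: B first builds a hash index mapping each value to the sorted list of its occurrence positions in a, then answers each query from b by binary-searching that list for the first occurrence at or after the cursor, instead of A's single two-pointer scan over a.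
import Mathlib
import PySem

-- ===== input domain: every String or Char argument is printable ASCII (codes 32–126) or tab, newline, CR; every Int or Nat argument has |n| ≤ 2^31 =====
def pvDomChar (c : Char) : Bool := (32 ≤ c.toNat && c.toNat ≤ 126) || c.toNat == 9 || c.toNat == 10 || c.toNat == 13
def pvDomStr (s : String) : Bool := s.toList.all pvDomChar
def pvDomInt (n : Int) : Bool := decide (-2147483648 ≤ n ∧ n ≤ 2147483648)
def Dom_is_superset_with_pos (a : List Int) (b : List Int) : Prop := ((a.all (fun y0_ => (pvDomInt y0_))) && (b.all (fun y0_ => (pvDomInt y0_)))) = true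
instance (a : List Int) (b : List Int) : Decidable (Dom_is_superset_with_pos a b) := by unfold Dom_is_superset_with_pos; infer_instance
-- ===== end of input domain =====

-- B replaces A's two-pointer scan by a prebuilt value→occurrence-positions index queried by binary search (alternative algorithm; return value only).
-- ===== PORT A =====
-- A's while loop: walk rest of a (cursor i) and rest of b; on match record i and advance both.
def pvALoop (aRest : List Int) (bRest : List Int) (i : Nat) (pos : List Int) : Bool × List Int :=
  match aRest, bRest with
  | x :: xs, y :: ys =>
      if x = y then pvALoop xs ys (i + 1) (pos ++ [(i : Int)])
      else pvALoop xs (y :: ys) (i + 1) pos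
  | _, bRest => (bRest.isEmpty, pos)

def is_superset_with_pos (a : List Int) (b : List Int) : Bool × List Int :=
  pvALoop a b 0 []

-- ===== PORT B =====
-- Source B's first pass: for idx, x in enumerate(a): occ.setdefault(x, []).append(idx)
-- (setdefault + in-place append is, as a key→value mapping, insert of the extended list; exact).
def pvBuildOcc (rest : List Int) (idx : Nat) (occ : PySem.Dict Int (List Nat)) : PySem.Dict Int (List Nat) :=
  match rest with
  | [] => occ
  | x :: xs => pvBuildOcc xs (idx + 1) (occ.insert x (occ.getD x [] ++ [idx]))

-- Source B's hand-written binary search: first index r in [lo,hi) with lst[r] >= i (lst[mid] via getD; exact since mid < len(lst) on every call).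
def pvBisect (lst : List Nat) (i lo hi : Nat) : Nat :=
  if _h : lo < hi then
    let mid := (lo + hi) / 2
    if lst.getD mid 0 < i then pvBisect lst i (mid + 1) hi
    else pvBisect lst i lo mid
  else lo
termination_by hi - lo
decreasing_by all_goals omega

-- Source B's query loop over b with cursor i (lst[lo] via getD; exact since lo < len(lst) in that branch).
def pvQuery (occ : PySem.Dict Int (List Nat)) (bRest : List Int) (i : Nat) (pos : List Int) : Bool × List Int :=
  match bRest with
  | [] => (true, pos)
  | x :: xs =>
      match occ.get? x with
      | none => (false, pos)
      | some lst =>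
          let r := pvBisect lst i 0 lst.length
          if r = lst.length then (false, pos)
          else pvQuery occ xs (lst.getD r 0 + 1) (pos ++ [((lst.getD r 0 : Nat) : Int)])

def is_superset_with_pos_alt (a : List Int) (b : List Int) : Bool × List Int :=
  pvQuery (pvBuildOcc a 0 PySem.Dict.empty) b 0 []

-- ===== PRECONDITION & SPEC =====
def Spec_is_superset_with_pos (a : List Int) (b : List Int) (out : Bool × List Int) : Prop := out = is_superset_with_pos_alt a b
instance (a : List Int) (b : List Int) (out : Bool × List Int) : Decidable (Spec_is_superset_with_pos a b out) := by unfold Spec_is_superset_with_pos; infer_instance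

-- ===== CLAIM (what is proved, stated in full; the proofs are below) =====
def Claim_equal_is_superset_with_pos : Prop := ∀ (a : List Int) (b : List Int), Dom_is_superset_with_pos a b → Spec_is_superset_with_pos a b (is_superset_with_pos a b)

-- ===== LEMMAS AND PROOFS =====

-- positions of x in a list, counting from i0 (the contents of B's index, and the backbone of the proof)
def posList (l : List Int) (x : Int) (i0 : Nat) : List Nat :=
  match l with
  | [] => []
  | y :: ys => if y = x then i0 :: posList ys x (i0 + 1) else posList ys x (i0 + 1)

-- linear forward search: first absolute index ≥ start of the scan where the value is x
def pvIndexFrom (rest : List Int) (x : Int) (k : Nat) : Option Nat :=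
  match rest with
  | [] => none
  | y :: ys => if y = x then some k else pvIndexFrom ys x (k + 1)

-- reference cursor loop: per query, the first occurrence of x in a at index ≥ i
def pvCursor (a : List Int) (bRest : List Int) (i : Nat) (pos : List Int) : Bool × List Int :=
  match bRest with
  | [] => (true, pos)
  | x :: xs =>
      match pvIndexFrom (a.drop i) x i with
      | none => (false, pos)
      | some k => pvCursor a xs (k + 1) (pos ++ [(k : Int)])

-- proof-only variant of the cursor loop carrying the remaining suffix of a directly
def pvCursorS (s : List Int) (bRest : List Int) (i : Nat) (pos : List Int) : Bool × List Int :=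
  match bRest with
  | [] => (true, pos)
  | x :: xs =>
      match pvIndexFrom s x i with
      | none => (false, pos)
      | some k => pvCursorS (s.drop (k + 1 - i)) xs (k + 1) (pos ++ [(k : Int)])

theorem pvIndexFrom_ge (rest : List Int) (x : Int) (k m : Nat)
    (h : pvIndexFrom rest x k = some m) : k ≤ m := by
  induction rest generalizing k with
  | nil => simp [pvIndexFrom] at h
  | cons y ys ih =>
    simp only [pvIndexFrom] at h
    split at h
    · cases h; exact le_refl _
    · exact Nat.le_of_succ_le (ih (k+1) h)

theorem pvCursorS_drop (a : List Int) (bRest : List Int) (i : Nat) (pos : List Int) :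
    pvCursor a bRest i pos = pvCursorS (a.drop i) bRest i pos := by
  induction bRest generalizing i pos with
  | nil => simp [pvCursor, pvCursorS]
  | cons x xs ih =>
    simp only [pvCursor, pvCursorS]
    cases h : pvIndexFrom (a.drop i) x i with
    | none => rfl
    | some k =>
      have hk : i ≤ k := pvIndexFrom_ge _ _ _ _ h
      have : (a.drop i).drop (k + 1 - i) = a.drop (k + 1) := by
        rw [List.drop_drop]; congr 1; omega
      simp only [ih (k + 1) (pos ++ [(k : Int)]), this]

-- A's two-pointer loop equals the cursor loop
theorem pvALoop_eq_pvCursorS (s : List Int) (bRest : List Int) (i : Nat) (pos : List Int) :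
    pvALoop s bRest i pos = pvCursorS s bRest i pos := by
  induction s generalizing bRest i pos with
  | nil =>
    cases bRest with
    | nil => simp [pvALoop, pvCursorS]
    | cons x xs => simp [pvALoop, pvCursorS, pvIndexFrom]
  | cons y ys ih =>
    cases bRest with
    | nil => simp [pvALoop, pvCursorS]
    | cons x xs =>
      simp only [pvALoop, pvCursorS, pvIndexFrom]
      by_cases hxy : y = x
      · simp only [hxy]
        rw [ih xs (i + 1) (pos ++ [(i : Int)])]
        simp
      · simp only [if_neg hxy]
        rw [ih (x :: xs) (i + 1) pos]
        simp only [pvCursorS]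
        cases h : pvIndexFrom ys x (i + 1) with
        | none => rfl
        | some k =>
          have hk : i + 1 ≤ k := pvIndexFrom_ge _ _ _ _ h
          have hdrop : (y :: ys).drop (k + 1 - i) = ys.drop (k + 1 - (i + 1)) := by
            have h1 : k + 1 - i = (k + 1 - (i + 1)) + 1 := by omega
            rw [h1, List.drop_succ_cons]
          simp only [hdrop]

-- ---- the index contains exactly posList ----
theorem pvBuildOcc_get? (rest : List Int) (idx : Nat) (d : PySem.Dict Int (List Nat)) (x : Int) :
    (pvBuildOcc rest idx d).get? x =
      match d.get? x with
      | none => if posList rest x idx = [] then none else some (posList rest x idx)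
      | some l => some (l ++ posList rest x idx) := by
  induction rest generalizing idx d with
  | nil => cases h : d.get? x <;> simp [pvBuildOcc, posList, h]
  | cons y ys ih =>
    simp only [pvBuildOcc, posList]
    rw [ih]
    rw [PySem.Dict.get?_insert]
    by_cases hxy : y = x
    · subst hxy
      rw [if_pos rfl]
      cases h : d.get? y with
      | none =>
        simp [PySem.Dict.getD_eq_get?_getD, h]
      | some l =>
        simp [PySem.Dict.getD_eq_get?_getD, h]
    · rw [if_neg (fun he => hxy he.symm)]
      simp [if_neg hxy]

-- ---- facts about posList ----
theorem posList_mem_ge (l : List Int) (x : Int) (i0 k : Nat) (h : k ∈ posList l x i0) : i0 ≤ k := by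
  induction l generalizing i0 with
  | nil => simp [posList] at h
  | cons y ys ih =>
    simp only [posList] at h
    split at h
    · rcases List.mem_cons.mp h with h1 | h1
      · omega
      · exact Nat.le_of_succ_le (ih (i0+1) h1)
    · exact Nat.le_of_succ_le (ih (i0+1) h)

theorem posList_sorted (l : List Int) (x : Int) (i0 : Nat) :
    (posList l x i0).Pairwise (· < ·) := by
  induction l generalizing i0 with
  | nil => simp [posList]
  | cons y ys ih =>
    simp only [posList]
    split
    · exact List.Pairwise.cons (fun k hk => Nat.lt_of_lt_of_le (Nat.lt_succ_self _) (posList_mem_ge _ _ _ _ hk)) (ih (i0+1))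
    · exact ih (i0+1)

theorem pvIndexFrom_eq_head (l : List Int) (x : Int) (j : Nat) :
    pvIndexFrom l x j = (posList l x j).head? := by
  induction l generalizing j with
  | nil => simp [pvIndexFrom, posList]
  | cons y ys ih =>
    simp only [pvIndexFrom, posList]
    split
    · rfl
    · exact ih (j+1)

theorem posList_find?_le (l : List Int) (x : Int) (i0 i : Nat) (h : i ≤ i0) :
    (posList l x i0).find? (fun k => decide (i ≤ k)) = (posList l x i0).head? := by
  cases hl : posList l x i0 with
  | nil => rfl
  | cons k ks =>
    have : i ≤ k := le_trans h (posList_mem_ge l x i0 k (by rw [hl]; exact List.mem_cons_self))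
    simp [List.find?, this]

-- the linear forward search read off the position index
theorem posList_find?_eq (l : List Int) (x : Int) (i0 i : Nat) (h : i0 ≤ i) :
    (posList l x i0).find? (fun k => decide (i ≤ k)) = pvIndexFrom (l.drop (i - i0)) x i := by
  induction l generalizing i0 with
  | nil => simp [posList, pvIndexFrom]
  | cons y ys ih =>
    rcases Nat.eq_or_lt_of_le h with he | hlt
    · subst he
      simp only [Nat.sub_self, List.drop_zero, pvIndexFrom, posList]
      split
      · simp
      · rw [posList_find?_le ys x (i0+1) i0 (Nat.le_succ _), pvIndexFrom_eq_head]
    · have hdrop : (y :: ys).drop (i - i0) = ys.drop (i - (i0 + 1)) := by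
        have h1 : i - i0 = (i - (i0+1)) + 1 := by omega
        rw [h1, List.drop_succ_cons]
      rw [hdrop]
      simp only [posList]
      split
      · rw [List.find?_cons_of_neg (by simp; omega)]
        exact ih (i0+1) hlt
      · exact ih (i0+1) hlt

-- ---- binary search correctness ----
theorem posList_getD_mono (lst : List Nat) (hs : lst.Pairwise (· < ·))
    (j k : Nat) (hjk : j ≤ k) (hk : k < lst.length) :
    lst.getD j 0 ≤ lst.getD k 0 := by
  rcases Nat.eq_or_lt_of_le hjk with he | hlt
  · subst he; exact le_refl _
  · have hj : j < lst.length := lt_trans hlt hk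
    rw [List.getD_eq_getElem lst 0 hj, List.getD_eq_getElem lst 0 hk]
    exact le_of_lt (List.pairwise_iff_getElem.mp hs j k hj hk hlt)

theorem pvBisect_spec (lst : List Nat) (i : Nat) (hs : lst.Pairwise (· < ·))
    (lo hi : Nat) (hlohi : lo ≤ hi) (hhi : hi ≤ lst.length)
    (hbelow : ∀ j, j < lo → lst.getD j 0 < i)
    (habove : ∀ j, hi ≤ j → j < lst.length → i ≤ lst.getD j 0) :
    pvBisect lst i lo hi ≤ lst.length ∧ (∀ j, j < pvBisect lst i lo hi → lst.getD j 0 < i) ∧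
      (∀ j, pvBisect lst i lo hi ≤ j → j < lst.length → i ≤ lst.getD j 0) := by
  rw [pvBisect]
  by_cases hlt : lo < hi
  · rw [dif_pos hlt]
    by_cases hm : lst.getD ((lo + hi) / 2) 0 < i
    · simp only [if_pos hm]
      exact pvBisect_spec lst i hs ((lo + hi) / 2 + 1) hi (by omega) hhi
        (fun j hj => lt_of_le_of_lt (posList_getD_mono lst hs j ((lo + hi) / 2) (by omega) (by omega)) hm)
        habove
    · simp only [if_neg hm]
      exact pvBisect_spec lst i hs lo ((lo + hi) / 2) (by omega) (by omega)
        hbelow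
        (fun j hj hjl => le_trans (Nat.le_of_not_lt hm) (posList_getD_mono lst hs ((lo + hi) / 2) j hj hjl))
  · rw [dif_neg hlt]
    exact ⟨by omega, hbelow, fun j hj hjl => habove j (by omega) hjl⟩
termination_by hi - lo
decreasing_by all_goals omega

-- a position r with the below/above properties determines find?
theorem find?_of_split (lst : List Nat) (i r : Nat) (hr : r ≤ lst.length)
    (hbelow : ∀ j, j < r → lst.getD j 0 < i)
    (habove : ∀ j, r ≤ j → j < lst.length → i ≤ lst.getD j 0) :
    lst.find? (fun k => decide (i ≤ k)) = if r = lst.length then none else some (lst.getD r 0) := by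
  induction lst generalizing r with
  | nil => simp at hr; simp [hr]
  | cons y ys ih =>
    cases r with
    | zero =>
      have hy : i ≤ y := by
        have := habove 0 (le_refl _) (by simp)
        simpa using this
      simp [List.find?, hy, List.getD]
    | succ s =>
      have hy : y < i := by have := hbelow 0 (by omega); simpa [List.getD] using this
      rw [List.find?_cons_of_neg (by simp; omega)]
      rw [ih s (by simpa using hr)
        (fun j hj => by have := hbelow (j+1) (by omega); simpa [List.getD] using this)
        (fun j hj hjl => by have := habove (j+1) (by omega) (by simpa using hjl); simpa [List.getD] using this)]
      simp only [List.length_cons]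
      by_cases hse : s = ys.length
      · simp [hse]
      · simp [hse, List.getD]

-- per-query: B's index lookup + binary search equals the linear forward search
theorem pvQuery_step (a : List Int) (x : Int) (i : Nat) :
    (match (pvBuildOcc a 0 PySem.Dict.empty).get? x with
      | none => none
      | some lst =>
          let r := pvBisect lst i 0 lst.length
          if r = lst.length then none else some (lst.getD r 0)) = pvIndexFrom (a.drop i) x i := by
  have hfind : (posList a x 0).find? (fun k => decide (i ≤ k)) = pvIndexFrom (a.drop i) x i := by
    have := posList_find?_eq a x 0 i (Nat.zero_le _)
    rwa [Nat.sub_zero] at this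
  rw [pvBuildOcc_get?, PySem.Dict.get?_empty]
  by_cases hp : posList a x 0 = []
  · simp only [hp]
    rw [← hfind, hp]
    simp
  · simp only [if_neg hp]
    have hs := posList_sorted a x 0
    obtain ⟨hr, hb, ha⟩ := pvBisect_spec (posList a x 0) i hs 0 (posList a x 0).length
      (Nat.zero_le _) (le_refl _) (by omega) (fun j hj hjl => by omega)
    rw [find?_of_split (posList a x 0) i _ hr hb ha] at hfind
    exact hfind

-- B's query loop equals the cursor loop
theorem pvQuery_eq_pvCursor (a : List Int) (bRest : List Int) (i : Nat) (pos : List Int) :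
    pvQuery (pvBuildOcc a 0 PySem.Dict.empty) bRest i pos = pvCursor a bRest i pos := by
  induction bRest generalizing i pos with
  | nil => rfl
  | cons x xs ih =>
    simp only [pvQuery, pvCursor]
    have hstep := pvQuery_step a x i
    cases hocc : (pvBuildOcc a 0 PySem.Dict.empty).get? x with
    | none =>
      rw [hocc] at hstep
      simp only at hstep
      rw [← hstep]
    | some lst =>
      rw [hocc] at hstep
      simp only at hstep
      by_cases hrl : pvBisect lst i 0 lst.length = lst.length
      · simp only [if_pos hrl] at hstep ⊢
        rw [← hstep]
      · simp only [if_neg hrl] at hstep ⊢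
        rw [← hstep]
        exact ih _ _

-- ===== VERDICT (by name: the statement is the Claim_ definition above) =====
theorem is_superset_with_pos_spec : Claim_equal_is_superset_with_pos := by
  intro a b _
  show is_superset_with_pos a b = is_superset_with_pos_alt a b
  unfold is_superset_with_pos is_superset_with_pos_alt
  rw [pvQuery_eq_pvCursor, pvALoop_eq_pvCursorS, pvCursorS_drop, List.drop_zero]
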